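-- pv_equiv track=rewrite | github.com/TeikiRaihauti/SourceToSemantic | Results/Stics_soil_temperature/3/Tempprofile_code.py | layer_thickness2depth
-- ===== SOURCE A (Python) =====
-- def layer_thickness2depth(layer_thick):
--     """
--     Convert layer thickness to cumulative depth per position.
--     Inputs:
--       - layer_thick: list of layer thicknesses (cm), may include trailing zeros
--     Returns:
--       - layer_depth: list where each non-zero thickness index contains cumulative depth (cm), zeros elsewhere
--     """
--     layers_nb = len(layer_thick)
--     layer_depth = [0] * layers_nb
--     running_sum = 0
--     for z in range(layers_nb):
--         if layer_thick[z] != 0: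
--             running_sum += layer_thick[z]
--             layer_depth[z] = running_sum
--         else:
--             layer_depth[z] = 0
--     return layer_depth
-- ===== SOURCE B (Python) =====
-- def layer_thickness2depth(layer_thick):
--     # Build the result back-to-front: walking the list in reverse, the cumulative
--     # depth at a position equals the grand total minus the thickness after it.
--     remaining = sum(layer_thick)
--     out = []
--     for t in reversed(layer_thick):
--         out.append(remaining if t != 0 else 0)
--         remaining -= t
--     out.reverse()
--     return out
-- ===== Notes on version B (the rewrite author's own statement) =====
-- stated objective: alternative
-- what changed: B builds the output back-to-front: it precomputes the grand total once, then walks the list in reverse subtracting each thickness, so each nonzero position gets total-minus-suffix instead of A's forward loop threading a running_sum into a preallocated index-addressed list.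
import Mathlib
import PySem

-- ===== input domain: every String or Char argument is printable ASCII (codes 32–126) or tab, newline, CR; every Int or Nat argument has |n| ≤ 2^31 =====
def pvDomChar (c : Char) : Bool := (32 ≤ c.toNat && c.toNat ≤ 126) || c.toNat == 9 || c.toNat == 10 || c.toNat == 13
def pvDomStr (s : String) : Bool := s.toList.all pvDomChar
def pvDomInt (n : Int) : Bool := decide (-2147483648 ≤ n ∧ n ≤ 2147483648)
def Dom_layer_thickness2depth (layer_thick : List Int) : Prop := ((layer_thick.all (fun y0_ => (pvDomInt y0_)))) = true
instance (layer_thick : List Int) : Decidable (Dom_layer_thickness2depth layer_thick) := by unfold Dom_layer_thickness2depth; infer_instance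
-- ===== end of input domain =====

-- B builds the output back-to-front: precompute the grand total, walk the list reversed
-- subtracting thicknesses, so each nonzero slot gets total-minus-suffix (alternative; same O(n)).


-- ===== PORT A =====
-- one loop iteration: reads layer_thick[z], writes layer_depth[z], updates running_sum
def pvStepA (lt : List Int) (st : List Int × Int) (z : Nat) : List Int × Int :=
  if lt.getD z 0 ≠ 0 then
    (st.1.set z (st.2 + lt.getD z 0), st.2 + lt.getD z 0)
  else
    (st.1.set z 0, st.2)

def layer_thickness2depth (layer_thick : List Int) : List Int :=
  let layers_nb := layer_thick.length
  ((List.range layers_nb).foldl (pvStepA layer_thick) (List.replicate layers_nb 0, 0)).1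

-- ===== PORT B =====
-- reversed loop: state = (out, remaining); appends remaining (or 0), then remaining -= t
def pvStepB (st : List Int × Int) (t : Int) : List Int × Int :=
  (st.1 ++ [if t ≠ 0 then st.2 else 0], st.2 - t)

def layer_thickness2depth_alt (layer_thick : List Int) : List Int :=
  ((layer_thick.reverse.foldl pvStepB ([], layer_thick.sum)).1).reverse

-- ===== PRECONDITION & SPEC =====
def Spec_layer_thickness2depth (layer_thick : List Int) (out : List Int) : Prop := out = layer_thickness2depth_alt layer_thick
instance (layer_thick : List Int) (out : List Int) : Decidable (Spec_layer_thickness2depth layer_thick out) := by unfold Spec_layer_thickness2depth; infer_instance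

-- ===== CLAIM =====
def Claim_equal_layer_thickness2depth : Prop := ∀ (layer_thick : List Int), Dom_layer_thickness2depth layer_thick → Spec_layer_thickness2depth layer_thick (layer_thickness2depth layer_thick)

-- ===== LEMMAS AND PROOFS =====

-- reference recursion both programs are shown equal to
def pvGo : List Int → Int → List Int
  | [], _ => []
  | t :: ts, rs => if t ≠ 0 then (rs + t) :: pvGo ts (rs + t) else 0 :: pvGo ts rs

lemma pv_take_set (ld : List Int) (k : Nat) (v : Int) (h : k < ld.length) :
    (ld.set k v).take (k + 1) = ld.take k ++ [v] := by
  induction ld generalizing k with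
  | nil => simp at h
  | cons a as ih =>
    cases k with
    | zero => simp
    | succ k =>
      simp only [List.set, List.take, List.cons_append]
      rw [ih k (by simpa using h)]

lemma pvA_inv (rest pre ld : List Int) (rs : Int)
    (hlen : ld.length = pre.length + rest.length) :
    ((List.range' pre.length rest.length).foldl (pvStepA (pre ++ rest)) (ld, rs)).1
      = ld.take pre.length ++ pvGo rest rs := by
  induction rest generalizing pre ld rs with
  | nil =>
    have hle : ld.length ≤ pre.length := by simpa using hlen.le
    simp [pvGo, List.take_of_length_le hle]
  | cons t ts ih =>
    simp only [List.length_cons] at hlen ⊢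
    rw [List.range'_succ, List.foldl_cons]
    have hk : pre.length < ld.length := by omega
    by_cases ht : t ≠ 0
    · have hstep : pvStepA (pre ++ t :: ts) (ld, rs) pre.length
          = (ld.set pre.length (rs + t), rs + t) := by
        simp [pvStepA, List.getD, ht]
      rw [hstep]
      have hpre : (pre ++ [t]).length = pre.length + 1 := by simp
      have := ih (pre ++ [t]) (ld.set pre.length (rs + t)) (rs + t)
        (by simp; omega)
      rw [hpre] at this
      rw [show pre ++ t :: ts = (pre ++ [t]) ++ ts by simp, this,
        pv_take_set ld pre.length (rs + t) hk]
      simp [pvGo, ht]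
    · rw [not_ne_iff] at ht
      have hstep : pvStepA (pre ++ t :: ts) (ld, rs) pre.length
          = (ld.set pre.length 0, rs) := by
        simp [pvStepA, List.getD, ht]
      rw [hstep]
      have hpre : (pre ++ [t]).length = pre.length + 1 := by simp
      have := ih (pre ++ [t]) (ld.set pre.length 0) rs (by simp; omega)
      rw [hpre] at this
      rw [show pre ++ t :: ts = (pre ++ [t]) ++ ts by simp, this,
        pv_take_set ld pre.length 0 hk]
      simp [pvGo, ht]

lemma pvA_eq_go (lt : List Int) : layer_thickness2depth lt = pvGo lt 0 := by
  have := pvA_inv lt [] (List.replicate lt.length 0) 0 (by simp)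
  simpa [layer_thickness2depth, List.range_eq_range'] using this

-- the reversed loop as a structural recursion on the reversed list
def pvRev : List Int → Int → List Int
  | [], _ => []
  | t :: ts, r => (if t ≠ 0 then r else 0) :: pvRev ts (r - t)

lemma pvB_fold (xs acc : List Int) (r : Int) :
    (xs.foldl pvStepB (acc, r)).1 = acc ++ pvRev xs r := by
  induction xs generalizing acc r with
  | nil => simp [pvRev]
  | cons t ts ih =>
    simp only [List.foldl_cons, pvStepB, pvRev]
    rw [ih]
    simp

lemma pvRev_append (xs ys : List Int) (r : Int) :
    pvRev (xs ++ ys) r = pvRev xs r ++ pvRev ys (r - xs.sum) := by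
  induction xs generalizing r with
  | nil => simp [pvRev]
  | cons t ts ih =>
    simp only [List.cons_append, pvRev, ih, List.sum_cons]
    congr 2
    ring_nf

lemma pvRev_eq_go (lt : List Int) (s : Int) :
    (pvRev lt.reverse (s + lt.sum)).reverse = pvGo lt s := by
  induction lt generalizing s with
  | nil => simp [pvRev, pvGo]
  | cons t ts ih =>
    rw [List.reverse_cons, pvRev_append]
    have hrem : s + (t :: ts).sum - ts.reverse.sum = s + t := by
      simp [List.sum_cons]; ring
    have hstart : s + (t :: ts).sum = (s + t) + ts.sum := by simp [List.sum_cons]; ring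
    rw [hrem, hstart]
    simp only [pvRev, List.reverse_append, List.reverse_cons, List.reverse_nil,
      List.nil_append, List.cons_append, ih (s + t)]
    by_cases ht : t = 0
    · subst ht; simp [pvGo]
    · simp [pvGo, ht]

lemma pvB_eq_go (lt : List Int) : layer_thickness2depth_alt lt = pvGo lt 0 := by
  rw [layer_thickness2depth_alt, pvB_fold]
  simpa using pvRev_eq_go lt 0

-- ===== VERDICT =====
theorem layer_thickness2depth_spec : Claim_equal_layer_thickness2depth := by
  intro lt _
  show _ = _
  rw [pvA_eq_go, pvB_eq_go]
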